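-- pv_equiv track=rewrite | github.com/sharif-ml-lab/CER | CoT_Decoding/Decoding.py | _find_subsequence_indices
-- ===== SOURCE A (Python) =====
-- from typing import List, Tuple, Dict, Optional
--
-- def _find_subsequence_indices(
--         sequence: List[int],
--         subsequence: List[int],
--         occurrence_count: int = 1
-- ) -> int:
--     """
--     Find the start index of the Nth occurrence (occurrence_count) of subsequence in sequence.
--     Returns -1 if not found.
--     """
--     found_count = 0
--     seq_len = len(sequence)
--     sub_len = len(subsequence)
--
--     for i in range(seq_len - sub_len + 1):
--         if sequence[i:i + sub_len] == subsequence: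
--             if found_count == occurrence_count - 1:
--                 return i
--             found_count += 1
--     return -1
-- ===== SOURCE B (Python) =====
-- def _find_subsequence_indices(sequence, subsequence, occurrence_count=1):
--     # Shift-And style: sweep the PATTERN, maintaining a viability mask over
--     # all candidate start positions, then pick the Nth surviving position.
--     viable = [True] * (len(sequence) - len(subsequence) + 1)
--     for j, p in enumerate(subsequence):
--         viable = [v and sequence[i + j] == p for i, v in enumerate(viable)]
--     count = 0
--     for i, v in enumerate(viable):
--         if v:
--             count += 1
--             if count == occurrence_count:
--                 return i
--     return -1
-- ===== Notes on version B (the rewrite author's own statement) =====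
-- stated objective: alternative
-- what changed: Replaced the position-by-position slice-comparison scan with a Shift-And style algorithm: an outer sweep over the PATTERN maintains a boolean viability mask over all candidate start positions, and a final pass picks the Nth surviving position.
import Mathlib
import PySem

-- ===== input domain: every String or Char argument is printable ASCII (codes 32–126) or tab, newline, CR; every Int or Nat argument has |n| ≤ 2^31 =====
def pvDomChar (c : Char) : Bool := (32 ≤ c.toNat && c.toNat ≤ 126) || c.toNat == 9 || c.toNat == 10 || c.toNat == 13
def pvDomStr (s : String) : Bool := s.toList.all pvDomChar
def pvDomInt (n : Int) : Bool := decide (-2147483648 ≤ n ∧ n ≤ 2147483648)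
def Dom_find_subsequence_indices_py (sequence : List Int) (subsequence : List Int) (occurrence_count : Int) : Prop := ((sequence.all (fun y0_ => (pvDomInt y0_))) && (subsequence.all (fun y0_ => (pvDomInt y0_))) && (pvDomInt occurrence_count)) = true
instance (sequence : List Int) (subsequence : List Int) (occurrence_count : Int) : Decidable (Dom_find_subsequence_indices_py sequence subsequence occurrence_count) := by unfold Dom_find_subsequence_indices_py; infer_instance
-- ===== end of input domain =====

-- B replaces A's slice-comparison scan by a Shift-And style viability mask swept over the pattern (objective: alternative algorithm, same cost).


-- ===== PORT A =====
-- A's 'for i in range(seq_len - sub_len + 1)' loop with found_count and the two early returns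
def findA_go (sequence : List Int) (subsequence : List Int) (occurrence_count : Int) : List Int → Int → Int
  | [], _ => -1
  | i :: rest, found_count =>
    if PySem.List.slice sequence (some i) (some (i + (subsequence.length : Int))) = subsequence then
      if found_count = occurrence_count - 1 then i
      else findA_go sequence subsequence occurrence_count rest (found_count + 1)
    else findA_go sequence subsequence occurrence_count rest found_count

def find_subsequence_indices_py (sequence : List Int) (subsequence : List Int) (occurrence_count : Int) : Int :=
  findA_go sequence subsequence occurrence_count
    (PySem.List.pyRange 0 ((sequence.length : Int) - (subsequence.length : Int) + 1) 1) 0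

-- ===== PORT B =====
-- one pattern step of B: viable = [v and sequence[i + j] == p for i, v in enumerate(viable)]
def stepB (sequence : List Int) (viable : List Bool) (jp : Int × Int) : List Bool :=
  (PySem.List.enumerate viable 0).map
    (fun iv => iv.2 && decide (PySem.List.pyGet? sequence (iv.1 + jp.1) = some jp.2))

-- B's final pass: count surviving positions, return the occurrence_count-th
def selB (occurrence_count : Int) : List (Int × Bool) → Int → Int
  | [], _ => -1
  | (i, v) :: rest, count =>
    if v then
      if count + 1 = occurrence_count then i
      else selB occurrence_count rest (count + 1)
    else selB occurrence_count rest count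

def find_subsequence_indices_py_alt (sequence : List Int) (subsequence : List Int) (occurrence_count : Int) : Int :=
  let viable0 : List Bool :=
    List.replicate (((sequence.length : Int) - (subsequence.length : Int) + 1).toNat) true
  let viable : List Bool :=
    (PySem.List.enumerate subsequence 0).foldl (stepB sequence) viable0
  selB occurrence_count (PySem.List.enumerate viable 0) 0

-- ===== PRECONDITION & SPEC =====
def Spec_find_subsequence_indices_py (sequence : List Int) (subsequence : List Int) (occurrence_count : Int) (out : Int) : Prop := out = find_subsequence_indices_py_alt sequence subsequence occurrence_count
instance (sequence : List Int) (subsequence : List Int) (occurrence_count : Int) (out : Int) : Decidable (Spec_find_subsequence_indices_py sequence subsequence occurrence_count out) := by unfold Spec_find_subsequence_indices_py; infer_instance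

-- ===== CLAIM (what is proved, stated in full; the proofs are below) =====
def Claim_equal_find_subsequence_indices_py : Prop := ∀ (sequence : List Int) (subsequence : List Int) (occurrence_count : Int), Dom_find_subsequence_indices_py sequence subsequence occurrence_count → Spec_find_subsequence_indices_py sequence subsequence occurrence_count (find_subsequence_indices_py sequence subsequence occurrence_count)

-- ===== LEMMAS AND PROOFS =====

-- the boolean "the pattern's first j elements match at start position k"
def gMatch (sequence : List Int) (subsequence : List Int) (j k : Nat) : Bool :=
  decide ((sequence.drop k).take j = subsequence.take j)

lemma enum_map_range' {α : Type} (f : Nat → α) :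
    ∀ (L s : Nat), PySem.List.enumerate ((List.range' s L).map f) (s : Int)
      = (List.range' s L).map (fun (k : Nat) => ((k : Int), f k)) := by
  intro L
  induction L with
  | zero => intro s; simp [PySem.List.enumerate_nil]
  | succ L ih =>
    intro s
    rw [List.range'_succ]
    simp only [List.map_cons, PySem.List.enumerate_cons]
    have : ((s : Int) + 1) = ((s + 1 : Nat) : Int) := by push_cast; ring
    rw [this, ih (s + 1)]

lemma enumerate_map_range {α : Type} (f : Nat → α) (L : Nat) :
    PySem.List.enumerate ((List.range L).map f) 0
      = (List.range L).map (fun (k : Nat) => ((k : Int), f k)) := by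
  have := enum_map_range' f L 0
  simpa [List.range_eq_range'] using this

-- pointwise step: matching j+1 pattern elements = matching j elements ∧ the j-th element
lemma gMatch_succ (sequence subsequence : List Int) (pre tl : List Int) (p : Int) (k : Nat)
    (hsub : subsequence = pre ++ p :: tl)
    (hk : k + (pre.length + 1) ≤ sequence.length) :
    (gMatch sequence subsequence pre.length k &&
        decide (PySem.List.pyGet? sequence ((k : Int) + (pre.length : Int)) = some p))
      = gMatch sequence subsequence (pre.length + 1) k := by
  have hidx : k + pre.length < sequence.length := by omega
  have hget : PySem.List.pyGet? sequence ((k : Int) + (pre.length : Int))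
      = some sequence[k + pre.length] := by
    have hcast : (k : Int) + (pre.length : Int) = ((k + pre.length : Nat) : Int) := by
      push_cast; ring
    rw [hcast, PySem.List.pyGet?_natCast, List.getElem?_eq_getElem hidx]
  have htake_sub : subsequence.take pre.length = pre := by
    simp [hsub]
  have htake_sub1 : subsequence.take (pre.length + 1) = pre ++ [p] := by
    rw [hsub, List.take_append]
    simp
  have hdropget : (sequence.drop k)[pre.length]? = some sequence[k + pre.length] := by
    rw [List.getElem?_drop, List.getElem?_eq_getElem hidx]
  have htakes : (sequence.drop k).take (pre.length + 1)
      = (sequence.drop k).take pre.length ++ [sequence[k + pre.length]] := by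
    rw [List.take_add_one, hdropget]
    rfl
  simp only [gMatch, htake_sub, htake_sub1, htakes, hget]
  have hlens : (List.take pre.length (List.drop k sequence)).length = pre.length := by
    simp [List.length_take]; omega
  by_cases h1 : List.take pre.length (List.drop k sequence) = pre
  · by_cases h2 : sequence[k + pre.length] = p
    · simp [h1, h2]
    · have hd2 : decide (some sequence[k + pre.length] = some p) = false := by
        simp [h2]
      rw [h1, hd2]
      simp only [decide_true, Bool.and_false]
      symm
      simp only [decide_eq_false_iff_not]
      intro hh
      exact h2 (by simpa using List.append_inj_right hh (by simp))
  · simp only [h1, decide_false, Bool.false_and]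
    symm
    simp only [decide_eq_false_iff_not]
    intro hh
    exact h1 (List.append_inj_left hh hlens)

-- B's fold over the remaining pattern, from a mask matching the first elements
lemma fold_viable (sequence subsequence : List Int) (L : Nat)
    (hL : ∀ k, k < L → k + subsequence.length ≤ sequence.length) :
    ∀ (tl pre : List Int), subsequence = pre ++ tl →
      (PySem.List.enumerate tl (pre.length : Int)).foldl (stepB sequence)
          ((List.range L).map (gMatch sequence subsequence pre.length))
        = (List.range L).map (gMatch sequence subsequence subsequence.length) := by
  intro tl
  induction tl with
  | nil =>
    intro pre hsub
    simp [PySem.List.enumerate_nil, hsub]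
  | cons p tl' ih =>
    intro pre hsub
    rw [PySem.List.enumerate_cons, List.foldl_cons]
    have hstep : stepB sequence ((List.range L).map (gMatch sequence subsequence pre.length))
        ((pre.length : Int), p)
        = (List.range L).map (gMatch sequence subsequence (pre.length + 1)) := by
      unfold stepB
      rw [enumerate_map_range]
      rw [List.map_map]
      apply List.map_congr_left
      intro k hk
      have hkL : k < L := List.mem_range.mp hk
      have hlen : subsequence.length = pre.length + 1 + tl'.length := by
        simp [hsub]; omega
      exact gMatch_succ sequence subsequence pre tl' p k hsub (by have := hL k hkL; omega)
    rw [hstep]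
    have hcast : ((pre.length : Int) + 1) = (((pre ++ [p]).length : Nat) : Int) := by
      simp
    rw [hcast]
    have := ih (pre ++ [p]) (by simpa using hsub)
    simpa using this

-- A's scan over a list of Nat indices equals B's selection over the matching mask
lemma scan_eq_sel (sequence subsequence : List Int) (occurrence_count : Int) :
    ∀ (ks : List Nat) (fc : Int),
      findA_go sequence subsequence occurrence_count (ks.map (fun (k : Nat) => (k : Int))) fc
        = selB occurrence_count
            (ks.map (fun (k : Nat) =>
              ((k : Int), gMatch sequence subsequence subsequence.length k))) fc := by
  intro ks
  induction ks with
  | nil => intro fc; simp [findA_go, selB]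
  | cons k rest ih =>
    intro fc
    simp only [List.map_cons, findA_go, selB]
    have hslice : PySem.List.slice sequence (some (k : Int))
        (some ((k : Int) + (subsequence.length : Int)))
        = (sequence.drop k).take subsequence.length :=
      PySem.List.slice_natCast_add sequence k subsequence.length
    rw [hslice]
    by_cases hm : (sequence.drop k).take subsequence.length = subsequence
    · have hg : gMatch sequence subsequence subsequence.length k = true := by
        simp only [gMatch, decide_eq_true_eq]
        rw [hm, List.take_of_length_le (le_refl _)]
      rw [if_pos hm, hg]
      simp only [if_true]
      by_cases hfc : fc = occurrence_count - 1
      · rw [if_pos hfc, if_pos (by omega)]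
      · rw [if_neg hfc, if_neg (by omega), ih]
    · have hg : gMatch sequence subsequence subsequence.length k = false := by
        simp only [gMatch, decide_eq_false_iff_not]
        rw [List.take_of_length_le (le_refl _)]
        exact hm
      rw [if_neg hm, hg]
      simp only [Bool.false_eq_true, if_false]
      exact ih fc

-- ===== VERDICT (by name: the statement is the Claim_ definition above) =====
theorem find_subsequence_indices_py_spec : Claim_equal_find_subsequence_indices_py := by
  intro sequence subsequence occurrence_count _
  unfold Spec_find_subsequence_indices_py
  unfold find_subsequence_indices_py find_subsequence_indices_py_alt
  set n := sequence.length with hn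
  set m := subsequence.length with hm
  set L : Nat := ((n : Int) - (m : Int) + 1).toNat with hLdef
  have hL : ∀ k, k < L → k + m ≤ n := by
    intro k hk
    simp only [hLdef] at hk
    omega
  have hinit : List.replicate L true = (List.range L).map (gMatch sequence subsequence 0) := by
    have hg : gMatch sequence subsequence 0 = (fun _ : Nat => true) := by
      funext k; simp [gMatch]
    rw [hg, List.map_const', List.length_range]
  have hfold : (PySem.List.enumerate subsequence 0).foldl (stepB sequence)
      (List.replicate L true) = (List.range L).map (gMatch sequence subsequence m) := by
    rw [hinit]
    have := fold_viable sequence subsequence L hL subsequence [] rfl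
    simpa using this
  have hrange : PySem.List.pyRange 0 ((n : Int) - (m : Int) + 1) 1
      = (List.range L).map (fun (k : Nat) => (k : Int)) := by
    rw [PySem.List.pyRange_one]
    have harg : (((n : Int) - (m : Int) + 1) - 0).toNat = L := by
      simp [hLdef]
    rw [harg]
    apply List.map_congr_left
    intro k _
    omega
  simp only [hfold, hrange, enumerate_map_range]
  exact scan_eq_sel sequence subsequence occurrence_count (List.range L) 0
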